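-- pv_equiv track=rewrite | github.com/AtheMathmo/mli-release | scripts/train_ae_fc/gen_job_array.py | generate_job_strings
-- ===== SOURCE A (Python) =====
-- import itertools
--
-- COMMAND_TEMPLATE = 'python scripts/train_ae_fc/train.py with '
--
-- class ConfigIterator:
--     def __init__(self, conf):
--         self.conf = conf
--
--     def __iter__(self):
--         return itertools.product(*[self.conf[key] for key in self.conf])
--
-- def generate_job_strings(config):
--     jobs = []
--     for setting in ConfigIterator(config):
--         command = COMMAND_TEMPLATE
--         for i, k in enumerate(config):
--             command += "'{}={}' ".format(k, setting[i])
--         command += '\n'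
--         jobs.append(command)
--     return jobs
-- ===== SOURCE B (Python) =====
-- COMMAND_TEMPLATE = 'python scripts/train_ae_fc/train.py with '
--
-- def generate_job_strings(config):
--     jobs = [COMMAND_TEMPLATE]
--     for k in config:
--         jobs = [cmd + "'{}={}' ".format(k, v) for cmd in jobs for v in config[k]]
--     return [cmd + '\n' for cmd in jobs]
-- ===== Notes on version B (the rewrite author's own statement) =====
-- stated objective: simpler
-- what changed: Replaces itertools.product of full value-tuples plus an inner enumerate/index loop with a single fold over the keys that expands an accumulator of partial command strings, interleaving formatting into the product construction.
import Mathlib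
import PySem

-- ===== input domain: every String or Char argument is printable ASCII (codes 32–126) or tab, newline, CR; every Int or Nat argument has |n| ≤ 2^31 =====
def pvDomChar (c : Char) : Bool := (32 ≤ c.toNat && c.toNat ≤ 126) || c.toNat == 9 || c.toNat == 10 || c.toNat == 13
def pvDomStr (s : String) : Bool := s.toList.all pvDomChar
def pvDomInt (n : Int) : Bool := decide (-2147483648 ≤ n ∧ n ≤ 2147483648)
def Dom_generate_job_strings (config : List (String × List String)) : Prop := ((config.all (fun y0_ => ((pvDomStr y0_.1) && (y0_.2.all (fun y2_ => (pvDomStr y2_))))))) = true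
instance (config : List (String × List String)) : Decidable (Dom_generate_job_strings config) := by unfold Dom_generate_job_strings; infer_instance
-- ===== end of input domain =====

-- B builds the Cartesian product by folding over the keys, expanding an accumulator of
-- partial command strings, instead of A's itertools.product plus an inner index loop. (simpler)

-- ===== PORT A =====
def pvTemplate : String := "python scripts/train_ae_fc/train.py with "

-- itertools.product(*lists): first list varies slowest
def pvProd : List (List String) → List (List String)
  | [] => [[]]
  | vs :: rest => vs.flatMap (fun v => (pvProd rest).map (fun t => v :: t))

def generate_job_strings (config : List (String × List String)) : List String :=
  (pvProd (config.map (·.2))).map (fun setting =>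
    ((PySem.List.enumerate (config.map (·.1)) 0).foldl
      (fun command ik =>
        command ++ "'" ++ ik.2 ++ "=" ++ PySem.List.pyGetD setting ik.1 "" ++ "' ")
      pvTemplate) ++ "\n")

-- ===== PORT B =====
def generate_job_strings_alt (config : List (String × List String)) : List String :=
  (config.foldl
    (fun jobs kv => jobs.flatMap (fun cmd => kv.2.map (fun v => cmd ++ "'" ++ kv.1 ++ "=" ++ v ++ "' ")))
    [pvTemplate]).map (fun cmd => cmd ++ "\n")

-- ===== PRECONDITION & SPEC =====
def Spec_generate_job_strings (config : List (String × List String)) (out : List String) : Prop := out = generate_job_strings_alt config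
instance (config : List (String × List String)) (out : List String) : Decidable (Spec_generate_job_strings config out) := by unfold Spec_generate_job_strings; infer_instance

-- ===== CLAIM (what is proved, stated in full; the proofs are below) =====
def Claim_equal_generate_job_strings : Prop := ∀ (config : List (String × List String)), Dom_generate_job_strings config → Spec_generate_job_strings config (generate_job_strings config)

-- ===== LEMMAS AND PROOFS =====

def pvStepB (jobs : List String) (kv : String × List String) : List String :=
  jobs.flatMap (fun cmd => kv.2.map (fun v => cmd ++ "'" ++ kv.1 ++ "=" ++ v ++ "' "))

-- every tuple of the product has one entry per list
theorem pvProd_length {ls : List (List String)} {t : List String}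
    (h : t ∈ pvProd ls) : t.length = ls.length := by
  induction ls generalizing t with
  | nil => simp [pvProd] at h; simp [h]
  | cons vs rest ih =>
    simp [pvProd] at h
    obtain ⟨v, _, t', ht', rfl⟩ := h
    simp [ih ht']

-- A's enumerate/index loop equals a fold over keys zipped with the tuple
theorem pvEnumFold (keys setting : List String) (s : Nat) (pre : String)
    (h : keys.length + s ≤ setting.length) :
    (PySem.List.enumerate keys (s : Int)).foldl
      (fun command ik =>
        command ++ "'" ++ ik.2 ++ "=" ++ PySem.List.pyGetD setting ik.1 "" ++ "' ")
      pre
    = (keys.zip (setting.drop s)).foldl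
        (fun command p => command ++ "'" ++ p.1 ++ "=" ++ p.2 ++ "' ") pre := by
  induction keys generalizing s pre with
  | nil => simp [PySem.List.enumerate_nil]
  | cons k keys ih =>
    have hs : s < setting.length := by simp at h; omega
    rw [PySem.List.enumerate_cons]
    have hget : PySem.List.pyGetD setting (s : Int) "" = setting[s] := by
      rw [PySem.List.pyGetD_natCast]
      exact List.getD_eq_getElem setting "" hs
    have hdrop : setting.drop s = setting[s] :: setting.drop (s + 1) := by
      exact List.drop_eq_getElem_cons hs
    simp only [List.foldl_cons, hget, hdrop, List.zip_cons_cons]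
    have := ih (s + 1) (pre ++ "'" ++ k ++ "=" ++ setting[s] ++ "' ") (by simp at h ⊢; omega)
    push_cast at this ⊢
    exact this

-- folding B's step from a list of seeds splits over the seeds
theorem pvFoldSeeds (rest : List (String × List String)) (seeds : List String) :
    rest.foldl pvStepB seeds = seeds.flatMap (fun s => rest.foldl pvStepB [s]) := by
  induction rest generalizing seeds with
  | nil => simp
  | cons kv rest ih =>
    simp only [List.foldl_cons]
    rw [ih (pvStepB seeds kv)]
    have h2 : ∀ s : String, List.foldl pvStepB (pvStepB [s] kv) rest
        = (kv.2.map (fun v => s ++ "'" ++ kv.1 ++ "=" ++ v ++ "' ")).flatMap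
            (fun s' => List.foldl pvStepB [s'] rest) := by
      intro s
      rw [ih]
      simp [pvStepB]
    simp only [h2]
    simp [pvStepB, List.flatMap_assoc, List.flatMap_map]

-- the core equivalence, with a generalized prefix
theorem pvMain (config : List (String × List String)) (pre : String) :
    (pvProd (config.map (·.2))).map (fun t =>
      ((config.map (·.1)).zip t).foldl
        (fun command p => command ++ "'" ++ p.1 ++ "=" ++ p.2 ++ "' ") pre)
    = config.foldl pvStepB [pre] := by
  induction config generalizing pre with
  | nil => simp [pvProd]
  | cons kv rest ih =>
    obtain ⟨k, vs⟩ := kv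
    simp only [List.map_cons, pvProd, List.map_flatMap, List.map_map, List.foldl_cons]
    rw [pvFoldSeeds rest (pvStepB [pre] (k, vs))]
    simp only [pvStepB, List.flatMap_cons, List.flatMap_nil, List.append_nil,
      List.flatMap_map]
    congr 1
    funext v
    rw [← ih (pre ++ "'" ++ k ++ "=" ++ v ++ "' ")]
    simp [Function.comp]

-- ===== VERDICT (by name: the statement is the Claim_ definition above) =====
theorem generate_job_strings_spec : Claim_equal_generate_job_strings := by
  intro config _
  unfold Spec_generate_job_strings generate_job_strings generate_job_strings_alt
  rw [show (config.foldl
      (fun jobs kv => jobs.flatMap (fun cmd => kv.2.map (fun v => cmd ++ "'" ++ kv.1 ++ "=" ++ v ++ "' ")))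
      [pvTemplate]) = config.foldl pvStepB [pvTemplate] from rfl]
  rw [← pvMain config pvTemplate]
  rw [List.map_map]
  apply List.map_congr_left
  intro t ht
  have hlen : t.length = config.length := by
    have := pvProd_length ht; simpa using this
  have := pvEnumFold (config.map (·.1)) t 0 pvTemplate (by simp [hlen])
  simp only [Int.natCast_zero, List.drop_zero] at this
  simp [Function.comp, this]
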